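-- pv_equiv track=rewrite | github.com/realray808/hw8 | Movie_recommend.py | ranking_order
-- ===== SOURCE A (Python) =====
-- def ranking_order(score, pos=4, value=0):
--     if pos < 1:
--         return value
--     else:
--         for i in score[:pos]:
--             if i <= score[pos]:
--                 value += 1
--     return ranking_order(score, pos-1, value)
-- ===== SOURCE B (Python) =====
-- def ranking_order(score, pos=4, value=0):
--     # Single forward pass over score[:pos+1], keeping the already-seen
--     # elements in a sorted list; a hand-written bisect_right gives, for each
--     # element, the number of preceding elements <= it.
--     if pos < 1:
--         return value
--     total = value
--     seen = []
--     for x in score[:pos + 1]: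
--         lo, hi = 0, len(seen)
--         while lo < hi:
--             mid = (lo + hi) // 2
--             if seen[mid] <= x:
--                 lo = mid + 1
--             else:
--                 hi = mid
--         total += lo
--         seen.insert(lo, x)
--     return total
-- ===== Notes on version B (the rewrite author's own statement) =====
-- stated objective: faster
-- what changed: Replaces A's downward recursion with a fresh slice-and-scan at every level (O(pos^2) comparisons plus O(pos) recursion depth) by one forward pass that keeps the already-seen elements in a sorted list and counts preceding <= elements with a hand-written bisect_right.
import Mathlib
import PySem

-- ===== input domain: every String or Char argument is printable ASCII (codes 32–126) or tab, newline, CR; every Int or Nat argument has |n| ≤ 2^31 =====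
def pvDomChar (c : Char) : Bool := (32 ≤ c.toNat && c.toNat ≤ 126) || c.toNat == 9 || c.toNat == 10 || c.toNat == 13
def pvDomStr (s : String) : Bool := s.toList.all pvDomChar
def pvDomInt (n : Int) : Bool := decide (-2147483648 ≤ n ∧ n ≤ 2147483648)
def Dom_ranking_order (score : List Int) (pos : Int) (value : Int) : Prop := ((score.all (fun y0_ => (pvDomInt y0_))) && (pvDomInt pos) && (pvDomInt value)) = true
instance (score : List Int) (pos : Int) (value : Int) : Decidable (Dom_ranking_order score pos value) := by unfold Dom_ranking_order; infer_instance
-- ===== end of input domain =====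

-- B replaces A's per-level slice-and-scan recursion by one forward pass over a sorted list
-- of seen elements with a hand-written binary search (objective: faster).

-- ===== PORT A =====
def ranking_order (score : List Int) (pos : Int) (value : Int) : Int :=
  if pos < 1 then value
  else
    -- score[pos]: in range on every admitted input (Pre_ranking_order), so pyGetD is exact
    ranking_order score (pos - 1)
      ((PySem.List.slice score none (some pos)).foldl
        (fun v i => if i ≤ PySem.List.pyGetD score pos 0 then v + 1 else v) value)
termination_by pos.toNat
decreasing_by omega

-- ===== PORT B =====
-- the while-loop 'lo, hi' binary search of Source B; seen[mid] is always in range on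
-- every reachable call (0 ≤ lo ≤ mid < hi ≤ len seen), so pyGetD is exact here
def roSearch (seen : List Int) (x : Int) (lo hi : Int) : Int :=
  if lo < hi then
    -- mid = (lo + hi) // 2, inlined; seen[mid] is in range on every reachable call
    if PySem.List.pyGetD seen (PySem.Int.floordiv (lo + hi) 2) 0 ≤ x then
      roSearch seen x (PySem.Int.floordiv (lo + hi) 2 + 1) hi
    else roSearch seen x lo (PySem.Int.floordiv (lo + hi) 2)
  else lo
termination_by (hi - lo).toNat
decreasing_by
  · have h1 := PySem.Int.floordiv_two_mid_bounds (lo := lo) (hi := hi) (by omega)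
    omega
  · have h1 := PySem.Int.floordiv_two_mid_bounds (lo := lo) (hi := hi) (by omega)
    have h2 : PySem.Int.floordiv (lo + hi) 2 < hi :=
      (PySem.Int.floordiv_lt_iff_lt_mul (by omega)).mpr (by omega)
    omega

-- the for-loop of Source B over score[:pos+1], state (total, seen)
def roLoop (xs : List Int) (total : Int) (seen : List Int) : Int :=
  match xs with
  | [] => total
  | x :: rest =>
      let lo := roSearch seen x 0 (seen.length : Int)
      roLoop rest (total + lo) (PySem.List.insert seen lo x)

def ranking_order_alt (score : List Int) (pos : Int) (value : Int) : Int :=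
  if pos < 1 then value
  else roLoop (PySem.List.slice score none (some (pos + 1))) value []

-- ===== PRECONDITION & SPEC =====
-- exactly the inputs where A returns: pos < 1 returns at once; on an empty score every
-- slice is empty and score[pos] is never evaluated; otherwise score[pos] (and every
-- score[p], 1 ≤ p ≤ pos, of the recursion) must be in range, else A raises IndexError
def Pre_ranking_order (score : List Int) (pos : Int) (value : Int) : Prop :=
  pos < 1 ∨ pos < (score.length : Int) ∨ score = []
instance (score : List Int) (pos : Int) (value : Int) : Decidable (Pre_ranking_order score pos value) := by unfold Pre_ranking_order; infer_instance
def pvWitness_ranking_order : List Int × Int × Int := ([1, 3, 2, 5, 4], 4, 0)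


def Spec_ranking_order (score : List Int) (pos : Int) (value : Int) (out : Int) : Prop := out = ranking_order_alt score pos value
instance (score : List Int) (pos : Int) (value : Int) (out : Int) : Decidable (Spec_ranking_order score pos value out) := by unfold Spec_ranking_order; infer_instance

-- ===== CLAIM (what is proved, stated in full; the proofs are below) =====
def Claim_equal_ranking_order : Prop := ∀ (score : List Int) (pos : Int) (value : Int), Dom_ranking_order score pos value → Pre_ranking_order score pos value → Spec_ranking_order score pos value (ranking_order score pos value)

-- ===== LEMMAS AND PROOFS =====

-- specification-side count: processing xs left to right with already-consumed list C,
-- add for each x the number of consumed elements ≤ x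
def pairG (C : List Int) (xs : List Int) : Int :=
  match xs with
  | [] => 0
  | x :: rest => (C.countP (fun y => decide (y ≤ x)) : Int) + pairG (C ++ [x]) rest

theorem countP_mono_take (seen : List Int) (x : Int)
    (hs : seen.Pairwise (· ≤ ·)) (m : Nat) (hm : m < seen.length) :
    seen[m] ≤ x ↔ m < seen.countP (fun y => decide (y ≤ x)) := by
  have hp := List.pairwise_iff_getElem.mp hs
  constructor
  · intro hle
    have hsplit := List.take_append_drop (m + 1) seen
    have hc : seen.countP (fun y => decide (y ≤ x)) =
        (seen.take (m + 1)).countP (fun y => decide (y ≤ x)) +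
        (seen.drop (m + 1)).countP (fun y => decide (y ≤ x)) := by
      conv_lhs => rw [← hsplit]
      exact List.countP_append ..
    have hall : ∀ a ∈ seen.take (m + 1), (fun y => decide (y ≤ x)) a = true := by
      intro a ha
      obtain ⟨i, hi, rfl⟩ := List.mem_iff_getElem.mp ha
      have hi' : i < m + 1 := by simp at hi; omega
      rw [List.getElem_take]
      simp only [decide_eq_true_eq]
      rcases Nat.lt_or_ge i m with h | h
      · exact le_trans (hp i m (by omega) hm h) hle
      · have : i = m := by omega
        subst this; exact hle
    have hlen : (seen.take (m + 1)).length = m + 1 := by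
      rw [List.length_take]; omega
    have := List.countP_eq_length.mpr hall
    omega
  · intro hlt
    by_contra hnle
    push_neg at hnle
    have hsplit := List.take_append_drop m seen
    have hc : seen.countP (fun y => decide (y ≤ x)) =
        (seen.take m).countP (fun y => decide (y ≤ x)) +
        (seen.drop m).countP (fun y => decide (y ≤ x)) := by
      conv_lhs => rw [← hsplit]
      exact List.countP_append ..
    have hzero : (seen.drop m).countP (fun y => decide (y ≤ x)) = 0 := by
      apply List.countP_eq_zero.mpr
      intro a ha
      obtain ⟨i, hi, rfl⟩ := List.mem_iff_getElem.mp ha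
      have hlen : (seen.drop m).length = seen.length - m := List.length_drop ..
      rw [List.getElem_drop]
      simp only [decide_eq_true_eq, not_le]
      rcases Nat.eq_zero_or_pos i with h | h
      · subst h; simpa using hnle
      · exact lt_of_lt_of_le hnle (hp m (m + i) hm (by omega) (by omega))
    have hle1 : (seen.take m).countP (fun y => decide (y ≤ x)) ≤ m := by
      have h := List.countP_le_length (l := seen.take m) (p := fun y => decide (y ≤ x))
      have h2 : (seen.take m).length ≤ m := by simp
      omega
    omega

theorem roSearch_eq (seen : List Int) (x : Int)
    (hs : seen.Pairwise (· ≤ ·)) :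
    ∀ (d lo hi : Nat), hi - lo ≤ d → hi ≤ seen.length →
      lo ≤ seen.countP (fun y => decide (y ≤ x)) →
      seen.countP (fun y => decide (y ≤ x)) ≤ hi →
      roSearch seen x (lo : Int) (hi : Int) =
        (seen.countP (fun y => decide (y ≤ x)) : Int) := by
  intro d
  induction d with
  | zero =>
      intro lo hi hd hhi h1 h2
      rw [roSearch]
      have : ¬ ((lo : Int) < (hi : Int)) := by exact_mod_cast by omega
      rw [if_neg this]
      congr 1; omega
  | succ d ih =>
      intro lo hi hd hhi h1 h2
      rw [roSearch]
      by_cases hlt : (lo : Int) < (hi : Int)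
      · rw [if_pos hlt]
        have hlt' : lo < hi := by exact_mod_cast hlt
        have hmid : PySem.Int.floordiv ((lo : Int) + (hi : Int)) 2 = (((lo + hi) / 2 : Nat) : Int) := by
          push_cast
          exact_mod_cast PySem.Int.floordiv_natCast (lo + hi) 2
        set m : Nat := (lo + hi) / 2 with hm
        have hmlo : lo ≤ m := by omega
        have hmhi : m < hi := by omega
        have hmlen : m < seen.length := by omega
        rw [hmid]
        rw [PySem.List.pyGetD_natCast]
        have hgd : seen.getD m 0 = seen[m] := List.getD_eq_getElem seen 0 hmlen
        rw [hgd]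
        by_cases hx : seen[m] ≤ x
        · rw [if_pos hx]
          have hk : m < seen.countP (fun y => decide (y ≤ x)) :=
            (countP_mono_take seen x hs m hmlen).mp hx
          have : ((m : Int) + 1) = ((m + 1 : Nat) : Int) := by push_cast; ring
          rw [this]
          exact ih (m + 1) hi (by omega) hhi (by omega) h2
        · rw [if_neg hx]
          have hk : seen.countP (fun y => decide (y ≤ x)) ≤ m := by
            by_contra hcon
            exact hx ((countP_mono_take seen x hs m hmlen).mpr (by omega))
          exact ih lo m (by omega) (by omega) h1 hk
      · rw [if_neg hlt]
        have h3 : ¬ lo < hi := by exact_mod_cast hlt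
        omega

theorem insert_sorted (seen : List Int) (x : Int)
    (hs : seen.Pairwise (· ≤ ·)) :
    (seen.take (seen.countP (fun y => decide (y ≤ x))) ++
      x :: seen.drop (seen.countP (fun y => decide (y ≤ x)))).Pairwise (· ≤ ·) := by
  set k := seen.countP (fun y => decide (y ≤ x)) with hk
  have hklen : k ≤ seen.length := List.countP_le_length ..
  have hp := List.pairwise_iff_getElem.mp hs
  rw [List.pairwise_append]
  refine ⟨hs.sublist (List.take_sublist ..), ?_, ?_⟩
  · rw [List.pairwise_cons]
    refine ⟨?_, hs.sublist (List.drop_sublist ..)⟩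
    intro a ha
    obtain ⟨i, hi, rfl⟩ := List.mem_iff_getElem.mp ha
    have hlen : (seen.drop k).length = seen.length - k := List.length_drop ..
    rw [List.getElem_drop]
    have : ¬ seen[k + i] ≤ x := by
      intro h
      have := (countP_mono_take seen x hs (k + i) (by omega)).mp h
      omega
    omega
  · intro a ha b hb
    obtain ⟨i, hi, rfl⟩ := List.mem_iff_getElem.mp ha
    have hlent : (seen.take k).length = k := by rw [List.length_take]; omega
    rw [List.getElem_take]
    have hax : seen[i] ≤ x :=
      (countP_mono_take seen x hs i (by omega)).mpr (by omega)
    rcases List.mem_cons.mp hb with rfl | hb'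
    · exact hax
    · obtain ⟨j, hj, rfl⟩ := List.mem_iff_getElem.mp hb'
      have hlend : (seen.drop k).length = seen.length - k := List.length_drop ..
      rw [List.getElem_drop]
      have hxj : ¬ seen[k + j] ≤ x := by
        intro h
        have := (countP_mono_take seen x hs (k + j) (by omega)).mp h
        omega
      omega

theorem roLoop_eq (xs : List Int) :
    ∀ (total : Int) (seen C : List Int), seen.Pairwise (· ≤ ·) → seen.Perm C →
      roLoop xs total seen = total + pairG C xs := by
  induction xs with
  | nil => intro total seen C _ _; simp [roLoop, pairG]
  | cons x rest ih =>
      intro total seen C hs hperm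
      rw [roLoop, pairG]
      set k := seen.countP (fun y => decide (y ≤ x)) with hk
      have hklen : k ≤ seen.length := List.countP_le_length ..
      have hsearch : roSearch seen x 0 (seen.length : Int) = (k : Int) := by
        have := roSearch_eq seen x hs seen.length 0 seen.length (by omega) (le_refl _)
          (by omega) hklen
        simpa using this
      have hcC : seen.countP (fun y => decide (y ≤ x)) = C.countP (fun y => decide (y ≤ x)) :=
        hperm.countP_eq _
      have hins : PySem.List.insert seen (k : Int) x = seen.take k ++ x :: seen.drop k :=
        PySem.List.insert_natCast seen k x hklen
      simp only [hsearch, hins]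
      rw [ih (total + (k : Int)) (seen.take k ++ x :: seen.drop k) (C ++ [x])
        (insert_sorted seen x hs)
        (((List.perm_middle).trans (by rw [List.take_append_drop]; exact hperm.cons x)).trans
          (List.perm_append_singleton x C).symm)]
      omega

theorem pairG_append (l : List Int) :
    ∀ (C : List Int) (x : Int),
      pairG C (l ++ [x]) = pairG C l + ((C ++ l).countP (fun y => decide (y ≤ x)) : Int) := by
  induction l with
  | nil => intro C x; simp [pairG]
  | cons a t ih =>
      intro C x
      simp only [List.cons_append, pairG]
      rw [ih (C ++ [a]) x]
      simp only [List.append_assoc, List.singleton_append]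
      ring

theorem ranking_order_eq_pairG (score : List Int) :
    ∀ (n : Nat) (value : Int), n < score.length →
      ranking_order score (n : Int) value = value + pairG [] (score.take (n + 1)) := by
  intro n
  induction n with
  | zero =>
      intro value _
      rw [ranking_order]
      norm_num [pairG]
      rcases score with _ | ⟨a, t⟩ <;> simp [pairG]
  | succ n ih =>
      intro value hlen
      rw [ranking_order]
      have hpos : ¬ (((n : Int) + 1) < 1) := by omega
      push_cast
      rw [if_neg hpos]
      have hget : PySem.List.pyGetD score ((n : Int) + 1) 0 = score[n + 1] := by
        have h : ((n : Int) + 1) = ((n + 1 : Nat) : Int) := by push_cast; ring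
        rw [h, PySem.List.pyGetD_natCast, List.getD_eq_getElem _ _ hlen]
      rw [hget]
      have hslice : PySem.List.slice score none (some ((n : Int) + 1)) = score.take (n + 1) := by
        have : ((n : Int) + 1) = ((n + 1 : Nat) : Int) := by push_cast; ring
        rw [this, PySem.List.slice_to_natCast]
      rw [hslice]
      have hfold : (score.take (n + 1)).foldl (fun v i => if i ≤ score[n + 1] then v + 1 else v) value
          = value + ((score.take (n + 1)).countP (fun y => decide (y ≤ score[n + 1])) : Int) := by
        have := PySem.List.foldl_if_add_one (l := score.take (n + 1))
          (p := fun y => decide (y ≤ score[n + 1])) (a := value)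
        simpa using this
      have harg : ((n : Int) + 1 - 1) = (n : Int) := by ring
      rw [hfold, harg, ih _ (by omega)]
      have htake : score.take (n + 1 + 1) = score.take (n + 1) ++ [score[n + 1]] :=
        List.take_succ_eq_append_getElem hlen
      rw [htake, pairG_append]
      simp only [List.nil_append]
      ring

theorem ranking_order_nil : ∀ (n : Nat) (pos value : Int), pos.toNat ≤ n →
    ranking_order ([] : List Int) pos value = value := by
  intro n
  induction n with
  | zero =>
      intro pos value h
      rw [ranking_order, if_pos (by omega)]
  | succ n ih =>
      intro pos value h
      by_cases hlt : pos < 1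
      · rw [ranking_order, if_pos hlt]
      · rw [ranking_order, if_neg hlt]
        have hb : (0 : Int) ≤ pos := by omega
        have hsl : PySem.List.slice ([] : List Int) none (some pos) = [] := by
          rw [PySem.List.slice_to _ hb]; simp
        rw [hsl]
        simp only [List.foldl_nil]
        exact ih (pos - 1) value (by omega)

-- ===== VERDICT (by name: the statement is the Claim_ definition above) =====
theorem ranking_order_spec : Claim_equal_ranking_order := by
  intro score pos value _ hpre
  unfold Spec_ranking_order ranking_order_alt
  by_cases hlt : pos < 1
  · rw [if_pos hlt, ranking_order, if_pos hlt]
  · rw [if_neg hlt]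
    rcases hpre with h | hlen | hnil
    · omega
    · have hn : pos = ((pos.toNat : Nat) : Int) := by omega
      have hslice : PySem.List.slice score none (some (pos + 1)) = score.take (pos.toNat + 1) := by
        have : pos + 1 = ((pos.toNat + 1 : Nat) : Int) := by omega
        rw [this, PySem.List.slice_to_natCast]
      rw [hslice, roLoop_eq _ value [] [] (by simp) (List.Perm.refl _)]
      rw [hn, ranking_order_eq_pairG score pos.toNat value (by omega)]
      simp only [Int.toNat_natCast]
    · subst hnil
      have hb : (0 : Int) ≤ pos + 1 := by omega
      have hsl : PySem.List.slice ([] : List Int) none (some (pos + 1)) = [] := by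
        rw [PySem.List.slice_to _ hb]; simp
      rw [hsl, ranking_order_nil pos.toNat pos value le_rfl]
      rfl
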